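-- pv_equiv track=rewrite | github.com/dirtysalt/codes | leetcode/minimum-impossible-or.py | minImpossibleOR
-- ===== SOURCE A (Python) =====
-- from typing import List
--
-- def minImpossibleOR(nums: List[int]) -> int:
--     ss = set(nums)
--     d = 0
--     while True:
--         ans = (1 << d)
--         if ans not in ss:
--             return ans
--         d += 1
-- ===== SOURCE B (Python) =====
-- from typing import List
--
-- def minImpossibleOR(nums: List[int]) -> int:
--     mask = 0
--     for x in nums:
--         if x > 0 and (x & (x - 1)) == 0:
--             mask |= x
--     return (~mask) & (mask + 1)
-- ===== Notes on version B (the rewrite author's own statement) =====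
-- stated objective: alternative
-- what changed: B replaces A's set construction and successive probing of 1<<d by a single pass that ORs the power-of-two elements into an integer bitmask and then extracts the lowest absent power with the closed-form bit trick (~mask) & (mask+1).
import Mathlib
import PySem

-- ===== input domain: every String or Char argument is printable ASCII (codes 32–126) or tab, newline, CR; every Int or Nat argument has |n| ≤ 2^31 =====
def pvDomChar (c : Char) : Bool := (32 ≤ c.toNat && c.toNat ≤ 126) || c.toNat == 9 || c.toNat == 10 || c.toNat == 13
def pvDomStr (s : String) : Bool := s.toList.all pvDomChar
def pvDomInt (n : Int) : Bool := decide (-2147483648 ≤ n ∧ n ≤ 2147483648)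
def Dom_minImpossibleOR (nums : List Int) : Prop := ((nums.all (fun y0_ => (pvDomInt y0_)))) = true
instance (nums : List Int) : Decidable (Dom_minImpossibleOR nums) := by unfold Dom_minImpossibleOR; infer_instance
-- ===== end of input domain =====

-- B replaces A's successive probing of 1<<d against a set by one accumulation pass
-- building a presence bitmask of the power-of-two elements, then extracts the lowest
-- absent power with the standard bit trick (~mask) & (mask+1).  Objective: alternative.

-- ===== PORT A =====
-- the while-True loop of A: probe 1 << d, return it if absent, else d += 1.
-- Termination: the probe 1 <<< d grows strictly, so the set of elements ≥ the probe shrinks.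
def pvGoA (ss : List Int) (d : Nat) : Int :=
  if ((1:Int) <<< d) ∈ ss then pvGoA ss (d+1) else (1:Int) <<< d
termination_by (ss.toFinset.filter (fun x => (1:Int) <<< d ≤ x)).card
decreasing_by
  apply Finset.card_lt_card
  constructor
  · intro x hx
    simp only [Finset.mem_filter] at hx ⊢
    refine ⟨hx.1, le_trans ?_ hx.2⟩
    simp only [Int.shiftLeft_eq]
    have : (2:Int)^d ≤ 2^(d+1) := by
      apply pow_le_pow_right₀ <;> omega
    omega
  · intro hsub
    have hmem : (1:Int) <<< d ∈ ss.toFinset.filter (fun x => (1:Int) <<< d ≤ x) := by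
      simp only [Finset.mem_filter, List.mem_toFinset]
      exact ⟨‹((1:Int) <<< d) ∈ ss›, le_refl _⟩
    have := hsub hmem
    simp only [Finset.mem_filter, Int.shiftLeft_eq] at this
    have h2 : (2:Int)^d < 2^(d+1) := by
      have := pow_lt_pow_right₀ (a := (2:Int)) (by norm_num) (Nat.lt_succ_self d)
      exact this
    omega

def minImpossibleOR (nums : List Int) : Int :=
  pvGoA (PySem.Set.ofList nums) 0

-- ===== PORT B =====
-- Int.land / Int.lor / Int.lnot are exactly Python's & | ~ on arbitrary ints.
def minImpossibleOR_alt (nums : List Int) : Int :=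
  let mask := nums.foldl (fun m x => if 0 < x ∧ Int.land x (x - 1) = 0 then Int.lor m x else m) 0
  Int.land (Int.lnot mask) (mask + 1)

-- ===== PRECONDITION & SPEC =====
def Spec_minImpossibleOR (nums : List Int) (out : Int) : Prop := out = minImpossibleOR_alt nums
instance (nums : List Int) (out : Int) : Decidable (Spec_minImpossibleOR nums out) := by unfold Spec_minImpossibleOR; infer_instance

-- ===== CLAIM (what is proved, stated in full; the proofs are below) =====
def Claim_equal_minImpossibleOR : Prop := ∀ (nums : List Int), Dom_minImpossibleOR nums → Spec_minImpossibleOR nums (minImpossibleOR nums)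

-- ===== LEMMAS AND PROOFS =====

-- number of trailing one-bits of M = index of the lowest unset bit
def pvLowd (M : Nat) : Nat :=
  if M % 2 = 0 then 0 else pvLowd (M / 2) + 1
decreasing_by omega

theorem pvLowd_even {M : Nat} (h : M % 2 = 0) : pvLowd M = 0 := by
  rw [pvLowd]; simp [h]

theorem pvLowd_odd {M : Nat} (h : M % 2 = 1) : pvLowd M = pvLowd (M / 2) + 1 := by
  rw [pvLowd]; simp [h]

theorem pv_trail_lt : ∀ (M i : Nat), i < pvLowd M → M.testBit i = true := by
  intro M
  induction M using Nat.strong_induction_on with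
  | _ M ih =>
    intro i hi
    rcases Nat.mod_two_eq_zero_or_one M with h | h
    · rw [pvLowd_even h] at hi; omega
    · rw [pvLowd_odd h] at hi
      cases i with
      | zero => simp [Nat.testBit_zero, h]
      | succ j =>
        rw [Nat.testBit_succ]
        exact ih (M / 2) (by omega) j (by omega)

theorem pv_trail_eq : ∀ (M : Nat), M.testBit (pvLowd M) = false := by
  intro M
  induction M using Nat.strong_induction_on with
  | _ M ih =>
    rcases Nat.mod_two_eq_zero_or_one M with h | h
    · rw [pvLowd_even h]; simp [Nat.testBit_zero, h]
    · rw [pvLowd_odd h, Nat.testBit_succ]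
      exact ih (M / 2) (by omega)

theorem pv_succBit_lt : ∀ (M i : Nat), i < pvLowd M → (M + 1).testBit i = false := by
  intro M
  induction M using Nat.strong_induction_on with
  | _ M ih =>
    intro i hi
    rcases Nat.mod_two_eq_zero_or_one M with h | h
    · rw [pvLowd_even h] at hi; omega
    · rw [pvLowd_odd h] at hi
      cases i with
      | zero => simp [Nat.testBit_zero]; omega
      | succ j =>
        rw [Nat.testBit_succ]
        have hdiv : (M + 1) / 2 = M / 2 + 1 := by omega
        rw [hdiv]
        exact ih (M / 2) (by omega) j (by omega)

theorem pv_succBit_eq : ∀ (M : Nat), (M + 1).testBit (pvLowd M) = true := by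
  intro M
  induction M using Nat.strong_induction_on with
  | _ M ih =>
    rcases Nat.mod_two_eq_zero_or_one M with h | h
    · rw [pvLowd_even h]; simp [Nat.testBit_zero]; omega
    · rw [pvLowd_odd h, Nat.testBit_succ]
      have hdiv : (M + 1) / 2 = M / 2 + 1 := by omega
      rw [hdiv]
      exact ih (M / 2) (by omega)

theorem pv_succBit_gt : ∀ (M i : Nat), pvLowd M < i → (M + 1).testBit i = M.testBit i := by
  intro M
  induction M using Nat.strong_induction_on with
  | _ M ih =>
    intro i hi
    rcases Nat.mod_two_eq_zero_or_one M with h | h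
    · rw [pvLowd_even h] at hi
      cases i with
      | zero => omega
      | succ j =>
        rw [Nat.testBit_succ, Nat.testBit_succ]
        have hdiv : (M + 1) / 2 = M / 2 := by omega
        rw [hdiv]
    · rw [pvLowd_odd h] at hi
      cases i with
      | zero => omega
      | succ j =>
        rw [Nat.testBit_succ, Nat.testBit_succ]
        have hdiv : (M + 1) / 2 = M / 2 + 1 := by omega
        rw [hdiv]
        exact ih (M / 2) (by omega) j (by omega)

-- the bit trick at the Nat level: (M+1) with M's bits removed is exactly the lowest zero bit of M
theorem pv_ldiff_succ (M : Nat) : Nat.ldiff (M + 1) M = 2 ^ pvLowd M := by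
  apply Nat.eq_of_testBit_eq
  intro i
  rw [Nat.testBit_ldiff, Nat.testBit_two_pow]
  rcases lt_trichotomy i (pvLowd M) with h | h | h
  · rw [pv_succBit_lt M i h]
    have hne : pvLowd M ≠ i := by omega
    simp [hne]
  · subst h
    rw [pv_succBit_eq M, pv_trail_eq M]
    simp
  · rw [pv_succBit_gt M i h]
    have hne : pvLowd M ≠ i := by omega
    rcases Bool.eq_false_or_eq_true (M.testBit i) with hb | hb <;> simp [hb, hne]

-- x & (x-1) == 0 characterizes the positive powers of two (Nat level)
theorem pv_pow_of_land (n : Nat) (h1 : 1 ≤ n) (h : n &&& (n - 1) = 0) : ∃ e, n = 2 ^ e := by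
  obtain ⟨M, rfl⟩ : ∃ M, n = M + 1 := ⟨n - 1, by omega⟩
  refine ⟨pvLowd M, ?_⟩
  apply Nat.eq_of_testBit_eq
  intro i
  have hand : ∀ j, ((M + 1).testBit j && M.testBit j) = false := by
    intro j
    have hj := congrArg (fun k => Nat.testBit k j) h
    simp only at hj
    rw [Nat.testBit_land, Nat.zero_testBit] at hj
    exact hj
  rw [Nat.testBit_two_pow]
  rcases lt_trichotomy i (pvLowd M) with hlt | heq | hgt
  · rw [pv_succBit_lt M i hlt]
    have hne : pvLowd M ≠ i := by omega
    simp [hne]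
  · subst heq; rw [pv_succBit_eq M]; simp
  · rw [pv_succBit_gt M i hgt]
    by_cases hb : M.testBit i = true
    · exfalso
      have hc := hand i
      rw [pv_succBit_gt M i hgt, hb] at hc
      simp at hc
    · have hne : pvLowd M ≠ i := by omega
      simp only [Bool.not_eq_true] at hb
      simp [hb, hne]

theorem pv_land_two_pow (e : Nat) : (2 ^ e) &&& (2 ^ e - 1) = 0 := by
  rw [Nat.two_pow_and, Nat.testBit_eq_false_of_lt (Nat.sub_lt (Nat.two_pow_pos e) one_pos)]
  simp

-- the B-side predicate holds exactly on the (Int) powers of two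
theorem pv_pred_iff (x : Int) :
    (0 < x ∧ Int.land x (x - 1) = 0) ↔ ∃ e : Nat, x = 2 ^ e := by
  constructor
  · rintro ⟨hpos, hland⟩
    obtain ⟨n, rfl⟩ : ∃ n : Nat, x = (n : Int) := ⟨x.toNat, by omega⟩
    have hn : 1 ≤ n := by exact_mod_cast hpos
    have hsub : (n : Int) - 1 = ((n - 1 : Nat) : Int) := by omega
    rw [hsub] at hland
    have : ((n &&& (n - 1) : Nat) : Int) = 0 := hland
    obtain ⟨e, he⟩ := pv_pow_of_land n hn (by exact_mod_cast this)
    exact ⟨e, by exact_mod_cast he⟩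
  · rintro ⟨e, rfl⟩
    refine ⟨by positivity, ?_⟩
    have hsub : ((2 : Int) ^ e) - 1 = ((2 ^ e - 1 : Nat) : Int) := by
      rw [Nat.cast_sub Nat.one_le_two_pow]
      push_cast; ring
    have hcast : ((2 : Int) ^ e) = ((2 ^ e : Nat) : Int) := by push_cast; ring
    rw [hsub, hcast]
    show ((2 ^ e &&& (2 ^ e - 1) : Nat) : Int) = 0
    rw [pv_land_two_pow]; rfl

-- B's fold over Int equals a Nat-level fold (the accumulator stays a Nat)
def pvFoldN (a : Nat) (l : List Int) : Nat :=
  l.foldl (fun a x => if 0 < x ∧ Int.land x (x - 1) = 0 then a ||| x.toNat else a) a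

theorem pv_fold_cast (l : List Int) : ∀ (a : Nat),
    l.foldl (fun m x => if 0 < x ∧ Int.land x (x - 1) = 0 then Int.lor m x else m) (a : Int)
      = (pvFoldN a l : Int) := by
  induction l with
  | nil => intro a; simp [pvFoldN]
  | cons x l ih =>
    intro a
    simp only [List.foldl, pvFoldN] at *
    by_cases h : 0 < x ∧ Int.land x (x - 1) = 0
    · have hx : x = ((x.toNat : Nat) : Int) := by omega
      rw [if_pos h, if_pos h]
      have : Int.lor (a : Int) x = ((a ||| x.toNat : Nat) : Int) := by
        conv_lhs => rw [hx]
        rfl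
      rw [this, ih]
    · rw [if_neg h, if_neg h, ih]

-- bits of the Nat fold = membership of the corresponding power in the list
theorem pv_fold_bit (l : List Int) : ∀ (a : Nat) (i : Nat),
    (pvFoldN a l).testBit i = (a.testBit i || decide (((2 : Int) ^ i) ∈ l)) := by
  induction l with
  | nil => intro a i; simp [pvFoldN]
  | cons x l ih =>
    intro a i
    simp only [pvFoldN, List.foldl] at *
    by_cases h : 0 < x ∧ Int.land x (x - 1) = 0
    · obtain ⟨e, rfl⟩ := (pv_pred_iff x).mp h
      rw [if_pos h, ih]
      have htn : ((2 : Int) ^ e).toNat = 2 ^ e := by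
        have : ((2 : Int) ^ e) = ((2 ^ e : Nat) : Int) := by push_cast; ring
        rw [this]; exact Int.toNat_natCast _
      rw [htn, Nat.testBit_lor, Nat.testBit_two_pow]
      have hmem : ((2 : Int) ^ i ∈ (2 : Int) ^ e :: l) ↔ (e = i ∨ (2 : Int) ^ i ∈ l) := by
        simp only [List.mem_cons]
        constructor
        · rintro (heq | hm)
          · left
            have : (2 : Nat) ^ i = 2 ^ e := by exact_mod_cast heq
            exact (Nat.pow_right_injective (le_refl 2) this).symm
          · right; exact hm
        · rintro (rfl | hm)
          · left; rfl
          · right; exact hm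
      by_cases he : e = i <;> by_cases hm : ((2 : Int) ^ i) ∈ l <;>
        simp [he, hm, hmem]
    · rw [if_neg h, ih]
      have hne : (2 : Int) ^ i ≠ x := by
        intro heq
        exact h (heq ▸ (pv_pred_iff ((2 : Int) ^ i)).mpr ⟨i, rfl⟩)
      simp [List.mem_cons, hne]

-- B's value, fully characterized
theorem pv_alt_eq (nums : List Int) :
    minImpossibleOR_alt nums = ((2 : Nat) ^ pvLowd (pvFoldN 0 nums) : Nat) := by
  show Int.land (Int.lnot (List.foldl (fun m x => if 0 < x ∧ Int.land x (x - 1) = 0 then Int.lor m x else m) 0 nums))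
        (List.foldl (fun m x => if 0 < x ∧ Int.land x (x - 1) = 0 then Int.lor m x else m) 0 nums + 1)
      = ((2 : Nat) ^ pvLowd (pvFoldN 0 nums) : Nat)
  have h0 : (List.foldl (fun m x => if 0 < x ∧ Int.land x (x - 1) = 0 then Int.lor m x else m) (0 : Int) nums)
      = ((pvFoldN 0 nums : Nat) : Int) := by
    have := pv_fold_cast nums 0
    simpa using this
  rw [h0]
  have hsucc : ((pvFoldN 0 nums : Nat) : Int) + 1 = (((pvFoldN 0 nums + 1 : Nat)) : Int) := by
    push_cast; ring
  rw [hsucc]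
  show ((Nat.ldiff (pvFoldN 0 nums + 1) (pvFoldN 0 nums) : Nat) : Int) = _
  rw [pv_ldiff_succ]

-- A's loop returns 1 <<< (d+k) as soon as the first k probes are present and the k-th is not
theorem pv_goA_eq (ss : List Int) : ∀ (k d : Nat),
    (∀ i, i < k → ((1 : Int) <<< (d + i)) ∈ ss) → ((1 : Int) <<< (d + k)) ∉ ss →
    pvGoA ss d = (1 : Int) <<< (d + k) := by
  intro k
  induction k with
  | zero =>
    intro d _ habs
    simp only [Nat.add_zero] at habs ⊢
    rw [pvGoA, if_neg habs]
  | succ k ih =>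
    intro d hpre habs
    rw [pvGoA]
    have h0 : ((1 : Int) <<< d) ∈ ss := by
      have := hpre 0 (by omega)
      simpa using this
    rw [if_pos h0]
    have h1 : ∀ i, i < k → ((1 : Int) <<< (d + 1 + i)) ∈ ss := by
      intro i hi
      have := hpre (i + 1) (by omega)
      have harr : d + (i + 1) = d + 1 + i := by omega
      rwa [harr] at this
    have h2 : ((1 : Int) <<< (d + 1 + k)) ∉ ss := by
      have harr : d + 1 + k = d + (k + 1) := by omega
      rwa [harr]
    rw [ih (d + 1) h1 h2]
    congr 1
    omega

theorem pv_shift_eq_pow (j : Nat) : (1 : Int) <<< j = (2 : Int) ^ j := by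
  rw [Int.shiftLeft_eq]; ring

-- ===== VERDICT (by name: the statement is the Claim_ definition above) =====
theorem minImpossibleOR_spec : Claim_equal_minImpossibleOR := by
  intro nums _
  unfold Spec_minImpossibleOR
  rw [pv_alt_eq]
  unfold minImpossibleOR
  set M := pvFoldN 0 nums with hM
  have hbit : ∀ i, M.testBit i = decide (((2 : Int) ^ i) ∈ nums) := by
    intro i
    rw [hM, pv_fold_bit]
    simp [Nat.zero_testBit]
  have hmem : ∀ (x : Int), x ∈ PySem.Set.ofList nums ↔ x ∈ nums := by
    intro x
    exact PySem.Set.mem_ofList nums x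
  rw [pv_goA_eq (PySem.Set.ofList nums) (pvLowd M) 0]
  · rw [pv_shift_eq_pow]; push_cast; ring
  · intro i hi
    rw [pv_shift_eq_pow, Nat.zero_add, hmem]
    have := pv_trail_lt M i hi
    rw [hbit i] at this
    exact of_decide_eq_true this
  · rw [pv_shift_eq_pow, Nat.zero_add, hmem]
    have := pv_trail_eq M
    rw [hbit (pvLowd M)] at this
    exact of_decide_eq_false this
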